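-- pv_equiv track=rewrite | github.com/kobeomseok95/remind-algorithm | python/programmers/level2/68645.py | solution
-- ===== SOURCE A (Python) =====
-- def calculate_end_number(n):
--     number = 0
--     for i in range(n, 0, -1):
--         number += i
--     return number
--
-- def change_dir(y, x, move_y, move_x, arr):
--     if y + move_y >= len(arr):
--         return True
--     if x + move_x >= len(arr[y]):
--         return True
--     next_y = y + move_y
--     next_x = x + move_x
--     if arr[next_y][next_x] != 0:
--         return True
--     return False
--
-- def solution(n):
--     arr = [[0] * i for i in range(1, n + 1)]
--     y, x = 0, 0
--     dirs = [(1, 0), (0, 1), (-1, -1)]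
--     dir = 0
--     end_number = calculate_end_number(n)
--     number = 1
--     while number <= end_number:
--         arr[y][x] = number
--         if change_dir(y, x, dirs[dir][0], dirs[dir][1], arr):
--             dir = (dir + 1) % 3
--         y += dirs[dir][0]
--         x += dirs[dir][1]
--         number += 1
--     answer = []
--     for a in arr:
--         answer.extend(a)
--     return answer
-- ===== SOURCE B (Python) =====
-- def solution(n):
--     arr = [[0] * i for i in range(1, n + 1)]
--     dirs = [(1, 0), (0, 1), (-1, -1)]
--     y, x, d, num = 0, 0, 0, 1
--     for leg in range(n, 0, -1):
--         dy, dx = dirs[d]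
--         for _ in range(leg):
--             arr[y][x] = num
--             num += 1
--             y += dy
--             x += dx
--         d = (d + 1) % 3
--         y += dirs[d][0] - dy
--         x += dirs[d][1] - dx
--     return [v for row in arr for v in row]
-- ===== Notes on version B (the rewrite author's own statement) =====
-- stated objective: alternative
-- what changed: A simulates the spiral cell by cell, probing the array (and its bounds) at every step to decide when to turn; B precomputes the leg lengths n, n-1, ..., 1 and cycles a direction index through (1,0),(0,1),(-1,-1), writing each whole leg without ever reading the array.
import Mathlib
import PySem

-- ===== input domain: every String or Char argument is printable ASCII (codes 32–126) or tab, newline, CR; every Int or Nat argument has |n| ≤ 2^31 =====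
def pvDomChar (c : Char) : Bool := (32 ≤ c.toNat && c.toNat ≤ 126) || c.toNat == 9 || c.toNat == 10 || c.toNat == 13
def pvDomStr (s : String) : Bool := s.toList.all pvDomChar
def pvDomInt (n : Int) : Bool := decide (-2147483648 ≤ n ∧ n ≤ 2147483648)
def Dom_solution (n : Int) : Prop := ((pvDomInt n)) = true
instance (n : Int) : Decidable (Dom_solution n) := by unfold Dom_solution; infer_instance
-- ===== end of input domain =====

-- B replaces A's step-by-step spiral simulation (probing the array to decide turns) by
-- precomputed leg lengths n, n-1, …, 1 with a cycling direction index; same output, no array reads.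

-- ===== PORT A =====
def calculate_end_number (n : Int) : Int :=
  (PySem.List.pyRange n 0 (-1)).foldl (fun number i => number + i) 0

-- arr[y] / arr[next_y][next_x] are read with pyGetD: at every reachable call the indices are
-- nonnegative and in range (guarded by the bound checks above them), where pyGetD = Python's access.
def change_dir (y x move_y move_x : Int) (arr : List (List Int)) : Bool :=
  if (arr.length : Int) ≤ y + move_y then true
  else if ((PySem.List.pyGetD arr y []).length : Int) ≤ x + move_x then true
  else
    let next_y := y + move_y
    let next_x := x + move_x
    if PySem.List.pyGetD (PySem.List.pyGetD arr next_y []) next_x 0 ≠ 0 then true else false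

-- the while loop of A; arr[y][x] = number via pySetD (indices in range at reachable states)
def loopA (dirs : List (Int × Int)) (end_number : Int) (arr : List (List Int))
    (y x dir number : Int) : List (List Int) :=
  if h : number ≤ end_number then
    let arr' := PySem.List.pySetD arr y (PySem.List.pySetD (PySem.List.pyGetD arr y []) x number)
    let v := PySem.List.pyGetD dirs dir (0, 0)
    let dir' := if change_dir y x v.1 v.2 arr' then PySem.Int.mod (dir + 1) 3 else dir
    let v' := PySem.List.pyGetD dirs dir' (0, 0)
    loopA dirs end_number arr' (y + v'.1) (x + v'.2) dir' (number + 1)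
  else arr
termination_by (end_number + 1 - number).toNat
decreasing_by omega

def solution (n : Int) : List Int :=
  let arr := (PySem.List.pyRange 1 (n + 1) 1).map (fun i => List.replicate i.toNat (0 : Int))
  let dirs : List (Int × Int) := [(1, 0), (0, 1), (-1, -1)]
  let end_number := calculate_end_number n
  let ans := loopA dirs end_number arr 0 0 0 1
  ans.foldl (fun answer a => answer ++ a) []

-- ===== PORT B =====
def solution_alt (n : Int) : List Int :=
  let dirs : List (Int × Int) := [(1, 0), (0, 1), (-1, -1)]
  let init : List (List Int) × Int × Int × Int × Int :=
    ((PySem.List.pyRange 1 (n + 1) 1).map (fun i => List.replicate i.toNat (0 : Int)), 0, 0, 0, 1)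
  let s := (PySem.List.pyRange n 0 (-1)).foldl
    (fun (s : List (List Int) × Int × Int × Int × Int) leg =>
      let (arr, y, x, d, num) := s
      let (dy, dx) := PySem.List.pyGetD dirs d (0, 0)
      let t := (PySem.List.pyRange 0 leg 1).foldl
        (fun (t : List (List Int) × Int × Int × Int) _ =>
          let (arr, y, x, num) := t
          (PySem.List.pySetD arr y (PySem.List.pySetD (PySem.List.pyGetD arr y []) x num),
           y + dy, x + dx, num + 1)) (arr, y, x, num)
      let d' := PySem.Int.mod (d + 1) 3
      let w := PySem.List.pyGetD dirs d' (0, 0)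
      (t.1, t.2.1 + w.1 - dy, t.2.2.1 + w.2 - dx, d', t.2.2.2)) init
  s.1.flatMap (fun row => row)

-- ===== PRECONDITION & SPEC =====
def Spec_solution (n : Int) (out : List Int) : Prop := out = solution_alt n
instance (n : Int) (out : List Int) : Decidable (Spec_solution n out) := by unfold Spec_solution; infer_instance

-- ===== CLAIM (what is proved, stated in full; the proofs are below) =====
def Claim_equal_solution : Prop := ∀ (n : Int), Dom_solution n → Spec_solution n (solution n)

-- ===== LEMMAS AND PROOFS =====

-- direction vectors; dir index stays in {0,1,2}
def vd (d : Int) : Int × Int := if d = 0 then (1, 0) else if d = 1 then (0, 1) else (-1, -1)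

def dirsL : List (Int × Int) := [(1, 0), (0, 1), (-1, -1)]

def nextStart (p v w : Int × Int) (L : Nat) : Int × Int :=
  (p.1 + ((L : Int) - 1) * v.1 + w.1, p.2 + ((L : Int) - 1) * v.2 + w.2)

def legPts (p : Int × Int) (v : Int × Int) (L : Nat) : List (Int × Int) :=
  (List.range L).map (fun (i : Nat) => (p.1 + (i : Int) * v.1, p.2 + (i : Int) * v.2))
def walk : List Nat → Int × Int → Int → List (Int × Int)
  | [], _, _ => []
  | L :: ls, p, d =>
    legPts p (vd d) L ++
      walk ls (nextStart p (vd d) (vd (PySem.Int.mod (d + 1) 3)) L) (PySem.Int.mod (d + 1) 3)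
def legs (m : Nat) : List Nat := (List.range m).map (fun i => m - i)
def P (m : Nat) : List (Int × Int) := walk (legs m) (0, 0) 0

lemma legPts_length (p v : Int × Int) (L : Nat) : (legPts p v L).length = L := by
  simp [legPts]

lemma legPts_cons (p v : Int × Int) (L : Nat) :
    legPts p v (L + 1) = p :: legPts (p.1 + v.1, p.2 + v.2) v L := by
  rw [legPts, List.range_succ_eq_map, List.map_cons, List.map_map]
  refine congrArg₂ _ (by simp) ?_
  rw [legPts]
  apply List.map_congr_left; intro i _
  simp only [Function.comp_apply, Prod.mk.injEq]
  push_cast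
  constructor <;> ring

lemma legPts_translate (p v q : Int × Int) (L : Nat) :
    legPts (p.1 + q.1, p.2 + q.2) v L = (legPts p v L).map (fun r => (r.1 + q.1, r.2 + q.2)) := by
  simp only [legPts, List.map_map, Function.comp_def]
  apply List.map_congr_left; intro i _
  simp only [Prod.mk.injEq]; constructor <;> ring

lemma legs_succ (m : Nat) : legs (m + 1) = (m + 1) :: legs m := by
  simp [legs, List.range_succ_eq_map, List.map_map, Function.comp_def]

lemma walk_length (ls : List Nat) : ∀ (p : Int × Int) (d : Int), (walk ls p d).length = ls.sum := by
  induction ls with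
  | nil => intro p d; rfl
  | cons L ls ih => intro p d; simp [walk, legPts, ih]

lemma walk_translate (ls : List Nat) : ∀ (p q : Int × Int) (d : Int),
    walk ls (p.1 + q.1, p.2 + q.2) d = (walk ls p d).map (fun r => (r.1 + q.1, r.2 + q.2)) := by
  induction ls with
  | nil => intro p q d; rfl
  | cons L ls ih =>
    intro p q d
    simp only [walk, List.map_append]
    refine congrArg₂ _ (legPts_translate ..) ?_
    have h := ih (nextStart p (vd d) (vd (PySem.Int.mod (d + 1) 3)) L) q (PySem.Int.mod (d + 1) 3)
    have hs : nextStart (p.1 + q.1, p.2 + q.2) (vd d) (vd (PySem.Int.mod (d + 1) 3)) L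
        = ((nextStart p (vd d) (vd (PySem.Int.mod (d + 1) 3)) L).1 + q.1,
           (nextStart p (vd d) (vd (PySem.Int.mod (d + 1) 3)) L).2 + q.2) := by
      simp only [nextStart, Prod.mk.injEq]; constructor <;> ring
    rw [hs]
    exact h

lemma P_succ3 (m : Nat) :
    P (m + 3) = legPts (0, 0) (1, 0) (m + 3) ++ legPts ((m : Int) + 2, 1) (0, 1) (m + 2)
      ++ legPts ((m : Int) + 1, (m : Int) + 1) (-1, -1) (m + 1)
      ++ (P m).map (fun r => (r.1 + 2, r.2 + 1)) := by
  have h1 : legs (m + 3) = (m + 3) :: (m + 2) :: (m + 1) :: legs m := by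
    rw [show m + 3 = (m + 2) + 1 from rfl, legs_succ, show m + 2 = (m + 1) + 1 from rfl,
      legs_succ, legs_succ]
  have hv0 : vd 0 = (1, 0) := rfl
  have hv1 : vd 1 = (0, 1) := by decide
  have hv2 : vd 2 = (-1, -1) := by decide
  have hm1 : PySem.Int.mod (0 + 1) 3 = 1 := by decide
  have hm2 : PySem.Int.mod (1 + 1) 3 = 2 := by decide
  have hm3 : PySem.Int.mod (2 + 1) 3 = 0 := by decide
  rw [P, h1, walk, hm1, walk, hm2, walk, hm3]
  have e1 : nextStart (0, 0) (vd 0) (vd 1) (m + 3) = ((m : Int) + 2, 1) := by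
    simp only [nextStart, hv0, hv1, Prod.mk.injEq]; push_cast; omega
  rw [e1]
  have e2 : nextStart ((m : Int) + 2, 1) (vd 1) (vd 2) (m + 2) = ((m : Int) + 1, (m : Int) + 1) := by
    simp only [nextStart, hv0, hv1, hv2, Prod.mk.injEq]; push_cast; omega
  rw [e2]
  have e3 : nextStart ((m : Int) + 1, (m : Int) + 1) (vd 2) (vd 0) (m + 1) = (2, 1) := by
    simp only [nextStart, hv0, hv1, hv2, Prod.mk.injEq]; push_cast; omega
  rw [e3]
  have e4 : walk (legs m) (2, 1) 0 = (P m).map (fun r => (r.1 + 2, r.2 + 1)) := by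
    have := walk_translate (legs m) (0, 0) (2, 1) 0
    simpa [P] using this
  rw [e4]
  simp [vd, List.append_assoc]

lemma P_head (m : Nat) (h : 1 ≤ m) : ∃ t, P m = ((0 : Int), (0 : Int)) :: t := by
  obtain ⟨m', rfl⟩ := Nat.exists_eq_add_of_le h
  rw [P, show 1 + m' = m' + 1 by omega, legs_succ, walk, legPts_cons]
  exact ⟨_, rfl⟩

def InTri (N : Nat) (p : Int × Int) : Prop := 0 ≤ p.2 ∧ p.2 ≤ p.1 ∧ p.1 < (N : Int)

lemma mem_legPts' {q p v : Int × Int} {L : Nat} :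
    q ∈ legPts p v L ↔ ∃ i : Nat, i < L ∧ q = (p.1 + (i : Int) * v.1, p.2 + (i : Int) * v.2) := by
  simp [legPts, List.mem_map, List.mem_range, eq_comm]

lemma P_one : P 1 = [((0:Int), (0:Int))] := by decide
lemma P_two : P 2 = [((0:Int), (0:Int)), (1, 0), (1, 1)] := by decide

lemma P_subset (m : Nat) : ∀ p ∈ P m, InTri m p := by
  induction m using Nat.strong_induction_on with
  | _ m ih =>
    match m with
    | 0 => intro p hp; simp [P, legs] at hp; exact absurd hp (by simp [walk])
    | 1 => intro p hp; rw [P_one] at hp; simp at hp; subst hp; exact ⟨le_refl _, le_refl _, by norm_num⟩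
    | 2 => intro p hp; rw [P_two] at hp; simp at hp
           rcases hp with h | h | h <;> subst h <;> exact ⟨by norm_num, by norm_num, by norm_num⟩
    | (m + 3) =>
      intro p hp
      rw [P_succ3] at hp
      simp only [List.mem_append] at hp
      rcases hp with ((h | h) | h) | h
      · rw [mem_legPts'] at h; obtain ⟨i, hi, rfl⟩ := h
        refine ⟨by norm_num, by norm_num, ?_⟩; push_cast; omega
      · rw [mem_legPts'] at h; obtain ⟨i, hi, rfl⟩ := h
        refine ⟨?_, ?_, ?_⟩ <;> push_cast <;> omega
      · rw [mem_legPts'] at h; obtain ⟨i, hi, rfl⟩ := h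
        refine ⟨?_, ?_, ?_⟩ <;> push_cast <;> omega
      · simp only [List.mem_map] at h; obtain ⟨q, hq, rfl⟩ := h
        obtain ⟨h1, h2, h3⟩ := ih m (by omega) q hq
        refine ⟨by omega, by omega, by push_cast; omega⟩

lemma legPts_nodup (p v : Int × Int) (L : Nat)
    (hv : v = (1, 0) ∨ v = (0, 1) ∨ v = (-1, -1)) : (legPts p v L).Nodup := by
  apply List.Nodup.map_on _ List.nodup_range
  intro i hi j hj hij
  rw [Prod.mk.injEq] at hij
  rcases hv with rfl | rfl | rfl <;> simp at hij <;> omega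

lemma P_nodup (m : Nat) : (P m).Nodup := by
  induction m using Nat.strong_induction_on with
  | _ m ih =>
    match m with
    | 0 => decide
    | 1 => decide
    | 2 => decide
    | (m + 3) =>
      rw [P_succ3]
      have hsub := P_subset m
      have hvd : ∀ q ∈ (P m).map (fun r => (r.1 + 2, r.2 + 1)),
          1 ≤ q.2 ∧ q.2 + 1 ≤ q.1 ∧ q.1 ≤ (m : Int) + 1 := by
        intro q hq
        simp only [List.mem_map] at hq; obtain ⟨r, hr, rfl⟩ := hq
        obtain ⟨h1, h2, h3⟩ := hsub r hr
        exact ⟨by omega, by omega, by omega⟩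
      have hinner : ((P m).map (fun r : Int × Int => (r.1 + 2, r.2 + 1))).Nodup := by
        refine (ih m (by omega)).map ?_
        intro a b hab
        simpa [Prod.ext_iff] using hab
      rw [List.append_assoc, List.append_assoc, List.nodup_append]
      refine ⟨legPts_nodup _ _ _ (by tauto), ?_, ?_⟩
      · rw [List.nodup_append]
        refine ⟨legPts_nodup _ _ _ (by tauto), ?_, ?_⟩
        · rw [List.nodup_append]
          refine ⟨legPts_nodup _ _ _ (by tauto), hinner, ?_⟩
          · intro x hx y hy
            rw [mem_legPts'] at hx; obtain ⟨i, hi, rfl⟩ := hx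
            obtain ⟨g1, g2, g3⟩ := hvd y hy
            simp only [ne_eq]; rintro rfl
            simp only at g1 g2 g3; omega
        · intro x hx y hy
          rw [mem_legPts'] at hx; obtain ⟨i, hi, rfl⟩ := hx
          rw [List.mem_append] at hy
          rcases hy with hy | hy
          · rw [mem_legPts'] at hy; obtain ⟨i', hi', rfl⟩ := hy
            simp only [ne_eq, Prod.mk.injEq, not_and]; intro e1 e2; omega
          · obtain ⟨g1, g2, g3⟩ := hvd y hy
            simp only [ne_eq]; rintro rfl
            simp only at g1 g2 g3; omega
      · intro x hx y hy
        rw [mem_legPts'] at hx; obtain ⟨i, hi, rfl⟩ := hx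
        simp only [List.mem_append] at hy
        rcases hy with hy | hy | hy
        · rw [mem_legPts'] at hy; obtain ⟨i', hi', rfl⟩ := hy
          simp only [ne_eq, Prod.mk.injEq, not_and]; intro e1 e2; omega
        · rw [mem_legPts'] at hy; obtain ⟨i', hi', rfl⟩ := hy
          simp only [ne_eq, Prod.mk.injEq, not_and]; intro e1 e2; omega
        · obtain ⟨g1, g2, g3⟩ := hvd y hy
          simp only [ne_eq]; rintro rfl
          simp only at g1 g2 g3; omega

lemma P_complete (m : Nat) : ∀ p, InTri m p → p ∈ P m := by
  induction m using Nat.strong_induction_on with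
  | _ m ih =>
    match m with
    | 0 => intro p ⟨h1, h2, h3⟩; exfalso; simp at h3; omega
    | 1 => intro p ⟨h1, h2, h3⟩
           rw [P_one]
           have : p = (0, 0) := by rw [Prod.ext_iff]; norm_num at h3 ⊢; omega
           simp [this]
    | 2 => intro p ⟨h1, h2, h3⟩
           rw [P_two]
           norm_num at h3
           have : p = (0, 0) ∨ p = (1, 0) ∨ p = (1, 1) := by
             rcases p with ⟨a, b⟩
             simp only [Prod.mk.injEq]
             omega
           rcases this with h | h | h <;> simp [h]
    | (m + 3) =>
      intro p ⟨h1, h2, h3⟩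
      rw [P_succ3]
      simp only [List.mem_append]
      by_cases hx0 : p.2 = 0
      · left; left; left
        rw [mem_legPts']
        refine ⟨p.1.toNat, by push_cast at h3 ⊢; omega, ?_⟩
        rw [Prod.ext_iff]
        simp
        omega
      · by_cases hybot : p.1 = (m : Int) + 2
        · left; left; right
          rw [mem_legPts']
          refine ⟨(p.2 - 1).toNat, by omega, ?_⟩
          rw [Prod.ext_iff]
          simp
          omega
        · by_cases hdiag : p.2 = p.1
          · left; right
            rw [mem_legPts']
            refine ⟨((m : Int) + 1 - p.1).toNat, by push_cast at h3; omega, ?_⟩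
            rw [Prod.ext_iff]
            simp
            omega
          · right
            simp only [List.mem_map]
            refine ⟨(p.1 - 2, p.2 - 1), ih m (by omega) _ ⟨by simp only; omega, by simp only; omega, by simp only; push_cast at h3; omega⟩, ?_⟩
            rw [Prod.ext_iff]
            simp only
            constructor <;> ring

def Shape (N : Nat) (arr : List (List Int)) : Prop :=
  arr.length = N ∧ ∀ i (h : i < arr.length), arr[i].length = i + 1
def arr0 (N : Nat) : List (List Int) := (List.range N).map (fun i => List.replicate (i + 1) (0 : Int))
def writeC (arr : List (List Int)) (p : Int × Int) (v : Int) : List (List Int) :=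
  PySem.List.pySetD arr p.1 (PySem.List.pySetD (PySem.List.pyGetD arr p.1 []) p.2 v)
def writeSeq : List (List Int) → List (Int × Int) → Int → List (List Int)
  | arr, [], _ => arr
  | arr, p :: ps, k => writeSeq (writeC arr p k) ps (k + 1)
def readC (arr : List (List Int)) (p : Int × Int) : Int :=
  PySem.List.pyGetD (PySem.List.pyGetD arr p.1 []) p.2 0

lemma shape_arr0 (N : Nat) : Shape N (arr0 N) := by
  constructor
  · simp [arr0]
  · intro i h
    simp [arr0] at h ⊢

lemma pyGetD_in_range {α : Type} [Inhabited α] (xs : List α) (i : Int) (d : α) (h1 : 0 ≤ i)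
    (h2 : i < (xs.length : Int)) : PySem.List.pyGetD xs i d = xs[i.toNat]'(by omega) :=
  PySem.List.pyGetD_eq_getElem xs d h1 h2

lemma rowLen {N : Nat} {arr : List (List Int)} (h : Shape N arr) {y : Int}
    (hy : 0 ≤ y) (hy2 : y < (N : Nat)) :
    ((PySem.List.pyGetD arr y []).length : Int) = y + 1 := by
  rw [pyGetD_in_range arr y [] hy (by rw [h.1]; omega)]
  · rw [h.2 y.toNat (by rw [h.1]; omega)]
    push_cast
    omega

lemma getD_set {α : Type} [Inhabited α] (l : List α) (a : Nat) (r : α) (b : Nat) (d : α)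
    (hb : b < l.length) :
    (l.set a r).getD b d = if a = b then r else l.getD b d := by
  rw [List.getD_eq_getElem _ _ (by simpa using hb), List.getElem_set,
    List.getD_eq_getElem _ _ hb]

lemma pyGetD_getD {α : Type} [Inhabited α] (xs : List α) (i : Int) (d : α) (h1 : 0 ≤ i)
    (h2 : i < (xs.length : Int)) : PySem.List.pyGetD xs i d = xs.getD i.toNat d := by
  rw [PySem.List.pyGetD_eq_getElem xs d h1 h2, List.getD_eq_getElem _ _ (by omega)]

lemma writeC_eq_set {N : Nat} {arr : List (List Int)} {p : Int × Int} (v : Int)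
    (h : Shape N arr) (hp : InTri N p) :
    writeC arr p v = arr.set p.1.toNat ((arr.getD p.1.toNat []).set p.2.toNat v) := by
  obtain ⟨h1, h2, h3⟩ := hp
  rw [writeC, pyGetD_getD arr p.1 [] (le_trans h1 h2) (by rw [h.1]; exact h3),
    PySem.List.pySetD_of_nonneg _ _ h1, PySem.List.pySetD_of_nonneg _ _ (le_trans h1 h2)]

lemma shape_writeC {N : Nat} {arr : List (List Int)} {p : Int × Int} {v : Int}
    (h : Shape N arr) (hp : InTri N p) : Shape N (writeC arr p v) := by
  rw [writeC_eq_set v h hp]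
  obtain ⟨h1, h2, h3⟩ := hp
  constructor
  · simp [h.1]
  · intro i hi
    simp only [List.length_set] at hi
    rw [List.getElem_set]
    split
    · next heq =>
      rw [List.length_set, List.getD_eq_getElem _ _ (by omega), h.2 _ (by omega), heq]
    · exact h.2 _ (by omega)

lemma readC_eq_getD {arr : List (List Int)} {N : Nat} {q : Int × Int}
    (h : Shape N arr) (hq : InTri N q) :
    readC arr q = (arr.getD q.1.toNat []).getD q.2.toNat 0 := by
  obtain ⟨g1, g2, g3⟩ := hq
  rw [readC, pyGetD_getD arr q.1 [] (le_trans g1 g2) (by rw [h.1]; exact g3),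
    pyGetD_getD _ q.2 0 g1
      (by rw [List.getD_eq_getElem _ _ (by rw [h.1]; omega), h.2 _ (by rw [h.1]; omega)]; push_cast; omega)]

lemma readC_writeC_self {N : Nat} {arr : List (List Int)} {p : Int × Int} (v : Int)
    (h : Shape N arr) (hp : InTri N p) : readC (writeC arr p v) p = v := by
  have hs := shape_writeC (v := v) h hp
  rw [readC_eq_getD hs hp, writeC_eq_set v h hp]
  obtain ⟨h1, h2, h3⟩ := hp
  rw [getD_set _ _ _ _ _ (by rw [h.1]; omega), if_pos rfl,
    getD_set _ _ _ _ _ (by rw [List.getD_eq_getElem _ _ (by rw [h.1]; omega), h.2 _ (by rw [h.1]; omega)]; omega),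
    if_pos rfl]

lemma readC_writeC_other {N : Nat} {arr : List (List Int)} {p q : Int × Int} (v : Int)
    (h : Shape N arr) (hp : InTri N p) (hq : InTri N q) (hne : q ≠ p) :
    readC (writeC arr p v) q = readC arr q := by
  have hs := shape_writeC (v := v) h hp
  rw [readC_eq_getD hs hq, readC_eq_getD h hq, writeC_eq_set v h hp]
  obtain ⟨h1, h2, h3⟩ := hp
  obtain ⟨g1, g2, g3⟩ := hq
  rw [getD_set _ _ _ _ _ (by rw [h.1]; omega)]
  by_cases hrow : p.1.toNat = q.1.toNat
  · have hr : q.1 = p.1 := by omega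
    have hc : q.2 ≠ p.2 := fun hcol => hne (Prod.ext hr hcol)
    rw [if_pos hrow, ← hrow,
      getD_set _ _ _ _ _ (by rw [List.getD_eq_getElem _ _ (by rw [h.1]; omega), h.2 _ (by rw [h.1]; omega)]; omega),
      if_neg (by omega), hrow]
  · rw [if_neg hrow]

lemma shape_writeSeq {N : Nat} {ps : List (Int × Int)} : ∀ {arr : List (List Int)} {k : Int},
    Shape N arr → (∀ p ∈ ps, InTri N p) → Shape N (writeSeq arr ps k) := by
  induction ps with
  | nil => intro arr k h _; exact h
  | cons p ps ih =>
    intro arr k h hps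
    rw [writeSeq]
    exact ih (shape_writeC h (hps p List.mem_cons_self)) (fun q hq => hps q (List.mem_cons_of_mem _ hq))

lemma readC_writeSeq_notMem {N : Nat} {ps : List (Int × Int)} : ∀ {arr : List (List Int)} {k : Int}
    {q : Int × Int}, Shape N arr → (∀ p ∈ ps, InTri N p) → InTri N q → q ∉ ps →
    readC (writeSeq arr ps k) q = readC arr q := by
  induction ps with
  | nil => intro arr k q _ _ _ _; rfl
  | cons p ps ih =>
    intro arr k q h hps hq hnm
    rw [writeSeq, ih (shape_writeC h (hps p List.mem_cons_self))
        (fun r hr => hps r (List.mem_cons_of_mem _ hr)) hq (fun hc => hnm (List.mem_cons_of_mem _ hc)),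
      readC_writeC_other k h (hps p List.mem_cons_self) hq (fun hc => hnm (hc ▸ List.mem_cons_self))]

lemma readC_writeSeq_mem {N : Nat} {ps : List (Int × Int)} : ∀ {arr : List (List Int)} {k : Int}
    {q : Int × Int}, Shape N arr → (∀ p ∈ ps, InTri N p) → q ∈ ps → 1 ≤ k →
    readC (writeSeq arr ps k) q ≠ 0 := by
  induction ps with
  | nil => intro arr k q _ _ hm _; exact absurd hm (List.not_mem_nil)
  | cons p ps ih =>
    intro arr k q h hps hm hk
    rw [writeSeq]
    by_cases hq : q ∈ ps
    · exact ih (shape_writeC h (hps p List.mem_cons_self))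
        (fun r hr => hps r (List.mem_cons_of_mem _ hr)) hq (by omega)
    · have hqp : q = p := by rcases List.mem_cons.mp hm with h' | h'; exact h'; exact absurd h' hq
      subst hqp
      rw [readC_writeSeq_notMem (shape_writeC h (hps q List.mem_cons_self))
          (fun r hr => hps r (List.mem_cons_of_mem _ hr)) (hps q List.mem_cons_self) hq,
        readC_writeC_self k h (hps q List.mem_cons_self)]
      omega

lemma readC_arr0 (N : Nat) (q : Int × Int) : readC (arr0 N) q = 0 := by
  simp only [readC, PySem.List.pyGetD]
  have hrow : ∀ a ∈ (PySem.List.pyGet? (arr0 N) q.1).getD [], a = (0 : Int) := by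
    intro a ha
    rcases hc : PySem.List.pyGet? (arr0 N) q.1 with _ | row
    · rw [hc] at ha; simp at ha
    · rw [hc] at ha
      simp only [Option.getD_some] at ha
      have hmem : row ∈ arr0 N := PySem.List.mem_of_pyGet?_eq_some _ hc
      simp only [arr0, List.mem_map] at hmem
      obtain ⟨i, _, hrw⟩ := hmem
      rw [← hrw] at ha
      exact List.eq_of_mem_replicate ha
  rcases hc : PySem.List.pyGet? ((PySem.List.pyGet? (arr0 N) q.1).getD []) q.2 with _ | a
  · simp
  · simp only [Option.getD_some]
    exact hrow a (PySem.List.mem_of_pyGet?_eq_some _ hc)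

lemma writeSeq_append (ps : List (Int × Int)) : ∀ (arr : List (List Int)) (qs : List (Int × Int)) (k : Int),
    writeSeq arr (ps ++ qs) k = writeSeq (writeSeq arr ps k) qs (k + ps.length) := by
  induction ps with
  | nil => intro arr qs k; simp [writeSeq]
  | cons p ps ih =>
    intro arr qs k
    rw [List.cons_append, writeSeq, writeSeq, ih]
    congr 1
    push_cast [List.length_cons]
    ring

def sh (j : Nat) (p : Int × Int) : Int × Int := (p.1 + 2 * (j : Int), p.2 + (j : Int))

lemma pyGetD_dirsL {d : Int} (hd : d = 0 ∨ d = 1 ∨ d = 2) :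
    PySem.List.pyGetD dirsL d (0, 0) = vd d := by
  rcases hd with h | h | h <;> subst h <;> decide

lemma mod3_mem {d : Int} (hd : d = 0 ∨ d = 1 ∨ d = 2) :
    PySem.Int.mod (d + 1) 3 = 0 ∨ PySem.Int.mod (d + 1) 3 = 1 ∨ PySem.Int.mod (d + 1) 3 = 2 := by
  rcases hd with h | h | h <;> subst h <;> decide

lemma loopA_exit {dirs : List (Int × Int)} {T : Int} {arr : List (List Int)} {y x d number : Int}
    (h : T < number) : loopA dirs T arr y x d number = arr := by
  rw [loopA]; simp [not_le.mpr h]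

lemma writeSeq_snoc (arr : List (List Int)) (pre : List (Int × Int)) (p : Int × Int) (k : Int) :
    writeSeq arr (pre ++ [p]) k = writeC (writeSeq arr pre k) p (k + pre.length) := by
  rw [writeSeq_append]; rfl

lemma change_dir_true {N : Nat} {ps : List (Int × Int)} {q : Int × Int} {d : Int}
    (hps : ∀ r ∈ ps, InTri N r) (hq : InTri N q)
    (hcase : (N : Int) ≤ q.1 + (vd d).1 ∨ q.1 + 1 ≤ q.2 + (vd d).2
      ∨ (q.1 + (vd d).1, q.2 + (vd d).2) ∈ ps) :
    change_dir q.1 q.2 (vd d).1 (vd d).2 (writeSeq (arr0 N) ps 1) = true := by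
  have hsh := shape_writeSeq (k := 1) (shape_arr0 N) hps
  rw [change_dir]
  by_cases h1 : (((writeSeq (arr0 N) ps 1).length : Nat) : Int) ≤ q.1 + (vd d).1
  · rw [if_pos h1]
  · rw [if_neg h1]
    by_cases h2 : (((PySem.List.pyGetD (writeSeq (arr0 N) ps 1) q.1 []).length : Nat) : Int)
        ≤ q.2 + (vd d).2
    · rw [if_pos h2]
    · rw [if_neg h2]
      have hread : PySem.List.pyGetD
          (PySem.List.pyGetD (writeSeq (arr0 N) ps 1) (q.1 + (vd d).1) [])
          (q.2 + (vd d).2) 0 ≠ 0 := by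
        rcases hcase with hc | hc | hc
        · exfalso; rw [hsh.1] at h1; omega
        · exfalso; rw [rowLen hsh (le_trans hq.1 hq.2.1) hq.2.2] at h2; omega
        · exact readC_writeSeq_mem (shape_arr0 N) hps hc (le_refl 1)
      rw [if_pos hread]

lemma change_dir_false {N : Nat} {ps : List (Int × Int)} {cur nxt : Int × Int} {d : Int}
    (hd : d = 0 ∨ d = 1 ∨ d = 2)
    (hps : ∀ r ∈ ps, InTri N r) (hcur : InTri N cur) (hnxt : InTri N nxt)
    (hv : nxt = (cur.1 + (vd d).1, cur.2 + (vd d).2)) (hnm : nxt ∉ ps) :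
    change_dir cur.1 cur.2 (vd d).1 (vd d).2 (writeSeq (arr0 N) ps 1) = false := by
  have hsh := shape_writeSeq (k := 1) (shape_arr0 N) hps
  have h1' : nxt.1 = cur.1 + (vd d).1 := by rw [hv]
  have h2' : nxt.2 = cur.2 + (vd d).2 := by rw [hv]
  have hc1 : ¬ (((writeSeq (arr0 N) ps 1).length : Nat) : Int) ≤ cur.1 + (vd d).1 := by
    rw [hsh.1]; have := hnxt.2.2; omega
  have hc2 : ¬ (((PySem.List.pyGetD (writeSeq (arr0 N) ps 1) cur.1 []).length : Nat) : Int)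
      ≤ cur.2 + (vd d).2 := by
    rw [rowLen hsh (le_trans hcur.1 hcur.2.1) hcur.2.2]
    obtain ⟨a1, a2, a3⟩ := hcur
    obtain ⟨b1, b2, b3⟩ := hnxt
    rcases hd with rfl | rfl | rfl <;> (simp [vd] at h1' h2' ⊢; omega)
  have hread : PySem.List.pyGetD
      (PySem.List.pyGetD (writeSeq (arr0 N) ps 1) (cur.1 + (vd d).1) [])
      (cur.2 + (vd d).2) 0 = 0 := by
    have h0 : readC (writeSeq (arr0 N) ps 1) nxt = 0 := by
      rw [readC_writeSeq_notMem (shape_arr0 N) hps hnxt hnm, readC_arr0]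
    rw [readC, h1', h2'] at h0
    exact h0
  rw [change_dir, if_neg hc1, if_neg hc2]
  simp only [hread, ne_eq, not_true_eq_false, if_false]

lemma legRun (N : Nat) : ∀ (L : Nat) (p q : Int × Int) (d : Int) (pre rest : List (Int × Int)),
    (d = 0 ∨ d = 1 ∨ d = 2) →
    pre ++ legPts p (vd d) L ++ rest = P N →
    1 ≤ L →
    q = (p.1 + ((L : Int) - 1) * (vd d).1, p.2 + ((L : Int) - 1) * (vd d).2) →
    (rest ≠ [] →
      (((N : Int) ≤ q.1 + (vd d).1 ∨ q.1 + 1 ≤ q.2 + (vd d).2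
          ∨ (q.1 + (vd d).1, q.2 + (vd d).2) ∈ pre)
       ∧ rest.head? = some (q.1 + (vd (PySem.Int.mod (d + 1) 3)).1,
            q.2 + (vd (PySem.Int.mod (d + 1) 3)).2))) →
    loopA dirsL ((P N).length : Int) (writeSeq (arr0 N) pre 1) p.1 p.2 d ((pre.length : Int) + 1)
      = if rest = [] then writeSeq (arr0 N) (P N) 1
        else loopA dirsL ((P N).length : Int)
          (writeSeq (arr0 N) (pre ++ legPts p (vd d) L) 1)
          (q.1 + (vd (PySem.Int.mod (d + 1) 3)).1) (q.2 + (vd (PySem.Int.mod (d + 1) 3)).2)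
          (PySem.Int.mod (d + 1) 3) ((pre.length : Int) + (L : Int) + 1) := by
  intro L
  induction L with
  | zero => intro p q d pre rest hd hP hL hq hturn; omega
  | succ L' IH =>
    intro p q d pre rest hd hP hL hq hturn
    have hsubP := P_subset N
    have hpre : ∀ r ∈ pre, InTri N r := fun r hr =>
      hsubP r (by rw [← hP]; exact List.mem_append_left _ (List.mem_append_left _ hr))
    have hp_mem : p ∈ P N := by
      rw [← hP]
      refine List.mem_append_left _ (List.mem_append_right _ ?_)
      rw [mem_legPts']; exact ⟨0, by omega, by simp⟩
    have hpI : InTri N p := hsubP p hp_mem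
    have hpre1 : ∀ r ∈ pre ++ [p], InTri N r := by
      intro r hr
      rcases List.mem_append.mp hr with hr | hr
      · exact hpre r hr
      · simp at hr; subst hr; exact hpI
    have hTlen : (P N).length = pre.length + (L' + 1) + rest.length := by
      rw [← hP]; simp only [List.length_append, legPts_length]
    have hnum : ((pre.length : Int)) + 1 ≤ (((P N).length : Nat) : Int) := by
      rw [hTlen]; push_cast; omega
    rw [loopA, dif_pos hnum]
    simp only [pyGetD_dirsL hd]
    have harr : PySem.List.pySetD (writeSeq (arr0 N) pre 1) p.1
        (PySem.List.pySetD (PySem.List.pyGetD (writeSeq (arr0 N) pre 1) p.1 []) p.2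
          ((pre.length : Int) + 1))
        = writeSeq (arr0 N) (pre ++ [p]) 1 := by
      rw [writeSeq_snoc, writeC, add_comm (1 : Int) (pre.length : Int)]
    rw [harr]
    by_cases hL0 : L' = 0
    · -- last cell of the leg
      subst hL0
      have hqp : q = p := by rw [hq]; simp
      subst hqp
      have hleg : legPts q (vd d) 1 = [q] := by simp [legPts]
      by_cases hrest : rest = []
      · subst hrest
        rw [if_pos rfl]
        rw [loopA_exit (by rw [hTlen]; push_cast [List.length_nil]; omega)]
        rw [← hP, hleg]
        simp
      · obtain ⟨hcase, hhead⟩ := hturn hrest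
        have hcase' : (N : Int) ≤ q.1 + (vd d).1 ∨ q.1 + 1 ≤ q.2 + (vd d).2
            ∨ (q.1 + (vd d).1, q.2 + (vd d).2) ∈ pre ++ [q] := by
          rcases hcase with h | h | h
          · exact Or.inl h
          · exact Or.inr (Or.inl h)
          · exact Or.inr (Or.inr (List.mem_append_left _ h))
        have hb := change_dir_true hpre1 hpI hcase'
        rw [hb, if_pos rfl, if_neg hrest, pyGetD_dirsL (mod3_mem hd), hleg]
        push_cast
        ring_nf
    · -- mid-leg cell: no turn
      have hL1 : 1 ≤ L' := by omega
      rw [legPts_cons] at hP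
      have hP' : (pre ++ [p]) ++ legPts (p.1 + (vd d).1, p.2 + (vd d).2) (vd d) L' ++ rest
          = P N := by rw [← hP]; simp
      have hp'_mem : (p.1 + (vd d).1, p.2 + (vd d).2) ∈ P N := by
        rw [← hP']
        refine List.mem_append_left _ (List.mem_append_right _ ?_)
        rw [mem_legPts']; exact ⟨0, by omega, by simp⟩
      have hp'I : InTri N (p.1 + (vd d).1, p.2 + (vd d).2) := hsubP _ hp'_mem
      have hnm : (p.1 + (vd d).1, p.2 + (vd d).2) ∉ pre ++ [p] := by
        have hnd := P_nodup N
        rw [← hP', List.append_assoc] at hnd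
        have hdisj := (List.nodup_append.mp hnd).2.2
        intro hmem
        exact hdisj _ hmem _
          (List.mem_append_left _ (by rw [mem_legPts']; exact ⟨0, by omega, by simp⟩)) rfl
      have hb := change_dir_false hd hpre1 hpI hp'I rfl hnm
      rw [hb]
      simp only [Bool.false_eq_true, if_false, pyGetD_dirsL hd]
      have hq' : q = ((p.1 + (vd d).1, p.2 + (vd d).2).1 + ((L' : Int) - 1) * (vd d).1,
          (p.1 + (vd d).1, p.2 + (vd d).2).2 + ((L' : Int) - 1) * (vd d).2) := by
        rw [hq, Prod.mk.injEq]; push_cast; constructor <;> ring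
      have hturn' : rest ≠ [] → (((N : Int) ≤ q.1 + (vd d).1 ∨ q.1 + 1 ≤ q.2 + (vd d).2
          ∨ (q.1 + (vd d).1, q.2 + (vd d).2) ∈ pre ++ [p])
          ∧ rest.head? = some (q.1 + (vd (PySem.Int.mod (d + 1) 3)).1,
              q.2 + (vd (PySem.Int.mod (d + 1) 3)).2)) := by
        intro hr
        obtain ⟨hc, hh⟩ := hturn hr
        refine ⟨?_, hh⟩
        rcases hc with h | h | h
        · exact Or.inl h
        · exact Or.inr (Or.inl h)
        · exact Or.inr (Or.inr (List.mem_append_left _ h))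
      have IH' := IH (p.1 + (vd d).1, p.2 + (vd d).2) q d (pre ++ [p]) rest hd hP' hL1 hq' hturn'
      simp only [List.length_append, List.length_cons, List.length_nil, Nat.cast_add,
        Nat.cast_one, Nat.cast_zero, zero_add] at IH'
      rw [List.append_assoc, List.singleton_append, ← legPts_cons] at IH'
      by_cases hrest : rest = []
      · rw [if_pos hrest]
        rw [if_pos hrest] at IH'
        exact IH'
      · rw [if_neg hrest]
        rw [if_neg hrest] at IH'
        refine IH'.trans ?_
        congr 1
        push_cast
        ring

lemma loopA_congr {dirs : List (Int × Int)} {T : Int} {arr : List (List Int)}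
    {y1 y2 x1 x2 d1 d2 n1 n2 : Int} (hy : y1 = y2) (hx : x1 = x2) (hd : d1 = d2)
    (hn : n1 = n2) : loopA dirs T arr y1 x1 d1 n1 = loopA dirs T arr y2 x2 d2 n2 := by
  subst hy; subst hx; subst hd; subst hn; rfl

lemma map_sh_legPts (j : Nat) (a b : Int) (v : Int × Int) (L : Nat) :
    (legPts (a, b) v L).map (sh j) = legPts (a + 2 * (j : Int), b + (j : Int)) v L :=
  (legPts_translate (a, b) v (2 * (j : Int), (j : Int)) L).symm

lemma map_sh_comp (j : Nat) (l : List (Int × Int)) :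
    (l.map (fun r : Int × Int => (r.1 + 2, r.2 + 1))).map (sh j) = l.map (sh (j + 1)) := by
  rw [List.map_map]
  apply List.map_congr_left
  intro r _
  simp only [Function.comp_apply, sh, Prod.mk.injEq]
  push_cast
  constructor <;> ring

lemma mem_pre_of {N : Nat} {pre suf : List (Int × Int)} {B : Int × Int}
    (hP : pre ++ suf = P N) (hB : B ∈ P N) (hns : B ∉ suf) : B ∈ pre := by
  rw [← hP] at hB
  rcases List.mem_append.mp hB with h | h
  · exact h
  · exact absurd h hns

lemma head?_legPts (p v : Int × Int) (L : Nat) (h : 1 ≤ L) :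
    (legPts p v L).head? = some p := by
  cases L with
  | zero => omega
  | succ L' => rw [legPts_cons]; rfl

lemma ne_nil_legPts {p v : Int × Int} {L : Nat} (h : 1 ≤ L) : legPts p v L ≠ [] := by
  intro hc
  have := legPts_length p v L
  rw [hc] at this
  simp at this
  omega

lemma inner_bounds (m j : Nat) : ∀ r ∈ (P m).map (sh (j + 1)),
    2 * (j : Int) + 2 ≤ r.1 ∧ r.1 ≤ 2 * (j : Int) + (m : Int) + 1 ∧ (j : Int) + 1 ≤ r.2
      ∧ r.2 + (j : Int) + 1 ≤ r.1 := by
  intro r hr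
  simp only [List.mem_map] at hr
  obtain ⟨t, ht, rfl⟩ := hr
  obtain ⟨h1, h2, h3⟩ := P_subset m t ht
  simp only [sh]
  push_cast
  refine ⟨by omega, by omega, by omega, by omega⟩

lemma cycleRun (N : Nat) : ∀ (m j : Nat) (pre : List (Int × Int)),
    3 * j + m = N →
    pre ++ (P m).map (sh j) = P N →
    loopA dirsL ((P N).length : Int) (writeSeq (arr0 N) pre 1)
        (2 * (j : Int)) (j : Int) 0 ((pre.length : Int) + 1)
      = writeSeq (arr0 N) (P N) 1 := by
  intro m
  induction m using Nat.strong_induction_on with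
  | _ m ih =>
    match m with
    | 0 =>
      intro j pre hjm hP
      rw [show P 0 = [] from rfl, List.map_nil, List.append_nil] at hP
      rw [loopA_exit (by rw [← hP]; push_cast; omega), hP]
    | 1 =>
      intro j pre hjm hP
      have hleg : (P 1).map (sh j) = legPts (2 * (j : Int), (j : Int)) (vd 0) 1 := by
        rw [P_one]
        simp [legPts, sh, vd]
      rw [hleg] at hP
      have h1 := legRun N 1 (2 * (j : Int), (j : Int)) (2 * (j : Int), (j : Int)) 0 pre []
        (by left; rfl) (by rw [← hP]; simp) (by omega)
        (by simp) (by intro hc; exact absurd rfl hc)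
      rw [if_pos rfl] at h1
      exact h1
    | 2 =>
      intro j pre hjm hP
      have hleg : (P 2).map (sh j)
          = legPts (2 * (j : Int), (j : Int)) (vd 0) 2
            ++ legPts (2 * (j : Int) + 1, (j : Int) + 1) (vd 1) 1 := by
        rw [P_two]
        simp [legPts, sh, vd, List.range_succ, Prod.ext_iff]
        norm_num
        omega
      rw [hleg] at hP
      have hP1 : pre ++ legPts (2 * (j : Int), (j : Int)) (vd 0) 2
          ++ legPts (2 * (j : Int) + 1, (j : Int) + 1) (vd 1) 1 = P N := by
        rw [← hP]; simp [List.append_assoc]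
      have hq1 : ((2 * (j : Int) + 1, (j : Int)) : Int × Int)
          = ((2 * (j : Int), (j : Int)).1 + (((2 : Nat) : Int) - 1) * (vd 0).1,
             (2 * (j : Int), (j : Int)).2 + (((2 : Nat) : Int) - 1) * (vd 0).2) := by
        simp [vd]
      have hturn1 : (legPts (2 * (j : Int) + 1, (j : Int) + 1) (vd 1) 1 ≠ []) →
          (((N : Int) ≤ 2 * (j : Int) + 1 + 1
            ∨ 2 * (j : Int) + 1 + 1 ≤ (j : Int) + 0
            ∨ ((2 * (j : Int) + 1 + 1, (j : Int) + 0) : Int × Int) ∈ pre)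
           ∧ (legPts (2 * (j : Int) + 1, (j : Int) + 1) (vd 1) 1).head?
             = some (2 * (j : Int) + 1 + 0, (j : Int) + 1)) := by
        intro _
        constructor
        · rcases Nat.eq_zero_or_pos j with hj | hj
          · subst hj; left; push_cast; omega
          · right; right
            have hBtri : InTri N (2 * (j : Int) + 1 + 1, (j : Int) + 0) := by
              refine ⟨by omega, by omega, by omega⟩
            have hBP : (2 * (j : Int) + 1 + 1, (j : Int) + 0) ∈ P N := P_complete N _ hBtri
            have hP2 : pre ++ (legPts (2 * (j : Int), (j : Int)) (vd 0) 2
                ++ legPts (2 * (j : Int) + 1, (j : Int) + 1) (vd 1) 1) = P N := by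
              rw [← hP1]; simp [List.append_assoc]
            refine mem_pre_of hP2 hBP ?_
            intro hc
            rcases List.mem_append.mp hc with hc | hc <;>
              (rw [mem_legPts'] at hc; obtain ⟨i, hi, heq⟩ := hc;
               rw [Prod.mk.injEq] at heq; obtain ⟨e1, e2⟩ := heq;
               simp [vd] at e1 e2; try omega)
        · rw [head?_legPts _ _ _ (by omega)]
          norm_num
      have h1 := legRun N 2 (2 * (j : Int), (j : Int)) (2 * (j : Int) + 1, (j : Int)) 0 pre
        (legPts (2 * (j : Int) + 1, (j : Int) + 1) (vd 1) 1)
        (by left; rfl) hP1 (by omega) hq1 hturn1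
      rw [if_neg (ne_nil_legPts (by omega))] at h1
      have h2 := legRun N 1 (2 * (j : Int) + 1, (j : Int) + 1) (2 * (j : Int) + 1, (j : Int) + 1)
        1 (pre ++ legPts (2 * (j : Int), (j : Int)) (vd 0) 2) []
        (by right; left; rfl) (by rw [← hP1]; simp) (by omega) (by simp)
        (by intro hc; exact absurd rfl hc)
      rw [if_pos rfl] at h2
      refine h1.trans (Eq.trans ?_ h2)
      refine loopA_congr (by simp [vd]) (by simp [vd]) (by decide) ?_
      simp only [List.length_append, legPts_length]
      push_cast
      ring
    | (m + 3) =>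
      intro j pre hjm hP
      have hdec : (P (m + 3)).map (sh j)
          = legPts (2 * (j : Int), (j : Int)) (1, 0) (m + 3)
            ++ legPts (2 * (j : Int) + (m : Int) + 2, (j : Int) + 1) (0, 1) (m + 2)
            ++ legPts (2 * (j : Int) + (m : Int) + 1, (j : Int) + (m : Int) + 1) (-1, -1) (m + 1)
            ++ (P m).map (sh (j + 1)) := by
        rw [P_succ3, List.map_append, List.map_append, List.map_append, map_sh_comp,
          map_sh_legPts, map_sh_legPts, map_sh_legPts]
        rw [show (0 : Int) + 2 * (j : Int) = 2 * (j : Int) from by ring,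
          show (0 : Int) + (j : Int) = (j : Int) from by ring,
          show ((m : Int) + 2) + 2 * (j : Int) = 2 * (j : Int) + (m : Int) + 2 from by ring,
          show (1 : Int) + (j : Int) = (j : Int) + 1 from by ring,
          show ((m : Int) + 1) + 2 * (j : Int) = 2 * (j : Int) + (m : Int) + 1 from by ring,
          show ((m : Int) + 1) + (j : Int) = (j : Int) + (m : Int) + 1 from by ring]
      rw [hdec] at hP
      have hinb := inner_bounds m j
      -- leg 1 (down)
      have hP1 : pre ++ legPts (2 * (j : Int), (j : Int)) (vd 0) (m + 3)
          ++ (legPts (2 * (j : Int) + (m : Int) + 2, (j : Int) + 1) (vd 1) (m + 2)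
            ++ (legPts (2 * (j : Int) + (m : Int) + 1, (j : Int) + (m : Int) + 1) (vd 2) (m + 1)
              ++ (P m).map (sh (j + 1)))) = P N := by
        rw [← hP]; simp [List.append_assoc, vd]
      have hq1 : ((2 * (j : Int) + (m : Int) + 2, (j : Int)) : Int × Int)
          = ((2 * (j : Int), (j : Int)).1 + (((m + 3 : Nat) : Int) - 1) * (vd 0).1,
             (2 * (j : Int), (j : Int)).2 + (((m + 3 : Nat) : Int) - 1) * (vd 0).2) := by
        rw [Prod.mk.injEq]
        constructor <;> simp [vd] <;> push_cast <;> ring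
      have hturn1 : (legPts (2 * (j : Int) + (m : Int) + 2, (j : Int) + 1) (vd 1) (m + 2)
            ++ (legPts (2 * (j : Int) + (m : Int) + 1, (j : Int) + (m : Int) + 1) (vd 2) (m + 1)
              ++ (P m).map (sh (j + 1))) ≠ []) →
          (((N : Int) ≤ 2 * (j : Int) + (m : Int) + 2 + 1
            ∨ 2 * (j : Int) + (m : Int) + 2 + 1 ≤ (j : Int) + 0
            ∨ ((2 * (j : Int) + (m : Int) + 2 + 1, (j : Int) + 0) : Int × Int) ∈ pre)
           ∧ (legPts (2 * (j : Int) + (m : Int) + 2, (j : Int) + 1) (vd 1) (m + 2)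
              ++ (legPts (2 * (j : Int) + (m : Int) + 1, (j : Int) + (m : Int) + 1) (vd 2) (m + 1)
                ++ (P m).map (sh (j + 1)))).head?
             = some (2 * (j : Int) + (m : Int) + 2 + 0, (j : Int) + 1)) := by
        intro _
        constructor
        · rcases Nat.eq_zero_or_pos j with hj | hj
          · subst hj; left; push_cast; omega
          · right; right
            have hBP : ((2 * (j : Int) + (m : Int) + 2 + 1, (j : Int) + 0) : Int × Int) ∈ P N :=
              P_complete N _ ⟨by omega, by omega, by omega⟩
            have hPg : pre ++ (legPts (2 * (j : Int), (j : Int)) (vd 0) (m + 3)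
                ++ (legPts (2 * (j : Int) + (m : Int) + 2, (j : Int) + 1) (vd 1) (m + 2)
                  ++ (legPts (2 * (j : Int) + (m : Int) + 1, (j : Int) + (m : Int) + 1) (vd 2) (m + 1)
                    ++ (P m).map (sh (j + 1))))) = P N := by
              rw [← hP1]; simp [List.append_assoc]
            refine mem_pre_of hPg hBP ?_
            intro hc
            rcases List.mem_append.mp hc with hc | hc
            · rw [mem_legPts'] at hc; obtain ⟨i, hi, heq⟩ := hc
              rw [Prod.mk.injEq] at heq; obtain ⟨e1, e2⟩ := heq
              simp [vd] at e1 e2 <;> omega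
            rcases List.mem_append.mp hc with hc | hc
            · rw [mem_legPts'] at hc; obtain ⟨i, hi, heq⟩ := hc
              rw [Prod.mk.injEq] at heq; obtain ⟨e1, e2⟩ := heq
              simp [vd] at e1 e2 <;> omega
            rcases List.mem_append.mp hc with hc | hc
            · rw [mem_legPts'] at hc; obtain ⟨i, hi, heq⟩ := hc
              rw [Prod.mk.injEq] at heq; obtain ⟨e1, e2⟩ := heq
              simp [vd] at e1 e2 <;> omega
            · obtain ⟨g1, g2, g3, g4⟩ := hinb _ hc; simp at g1 g2 g3 g4 <;> omega
        · rw [legPts_cons, List.cons_append]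
          simp
      have h1 := legRun N (m + 3) (2 * (j : Int), (j : Int))
        (2 * (j : Int) + (m : Int) + 2, (j : Int)) 0 pre _
        (by left; rfl) hP1 (by omega) hq1 hturn1
      rw [if_neg (by
        intro hc
        exact ne_nil_legPts (show 1 ≤ m + 2 by omega) (List.append_eq_nil_iff.mp hc).1)] at h1
      -- leg 2 (right)
      have hP2 : (pre ++ legPts (2 * (j : Int), (j : Int)) (vd 0) (m + 3))
          ++ legPts (2 * (j : Int) + (m : Int) + 2, (j : Int) + 1) (vd 1) (m + 2)
          ++ (legPts (2 * (j : Int) + (m : Int) + 1, (j : Int) + (m : Int) + 1) (vd 2) (m + 1)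
            ++ (P m).map (sh (j + 1))) = P N := by
        rw [← hP1]; simp [List.append_assoc]
      have hq2 : ((2 * (j : Int) + (m : Int) + 2, (j : Int) + (m : Int) + 2) : Int × Int)
          = ((2 * (j : Int) + (m : Int) + 2, (j : Int) + 1).1
              + (((m + 2 : Nat) : Int) - 1) * (vd 1).1,
             (2 * (j : Int) + (m : Int) + 2, (j : Int) + 1).2
              + (((m + 2 : Nat) : Int) - 1) * (vd 1).2) := by
        rw [Prod.mk.injEq]
        constructor <;> simp [vd] <;> push_cast <;> ring
      have hturn2 : (legPts (2 * (j : Int) + (m : Int) + 1, (j : Int) + (m : Int) + 1) (vd 2) (m + 1)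
            ++ (P m).map (sh (j + 1)) ≠ []) →
          (((N : Int) ≤ 2 * (j : Int) + (m : Int) + 2 + 0
            ∨ 2 * (j : Int) + (m : Int) + 2 + 1 ≤ (j : Int) + (m : Int) + 2 + 1
            ∨ ((2 * (j : Int) + (m : Int) + 2 + 0, (j : Int) + (m : Int) + 2 + 1) : Int × Int)
              ∈ pre ++ legPts (2 * (j : Int), (j : Int)) (vd 0) (m + 3))
           ∧ (legPts (2 * (j : Int) + (m : Int) + 1, (j : Int) + (m : Int) + 1) (vd 2) (m + 1)
              ++ (P m).map (sh (j + 1))).head?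
             = some (2 * (j : Int) + (m : Int) + 2 + -1, (j : Int) + (m : Int) + 2 + -1)) := by
        intro _
        constructor
        · rcases Nat.eq_zero_or_pos j with hj | hj
          · subst hj; right; left; push_cast; omega
          · right; right
            have hBP : ((2 * (j : Int) + (m : Int) + 2 + 0, (j : Int) + (m : Int) + 2 + 1)
                : Int × Int) ∈ P N :=
              P_complete N _ ⟨by omega, by omega, by omega⟩
            have hPg2 : (pre ++ legPts (2 * (j : Int), (j : Int)) (vd 0) (m + 3))
                ++ (legPts (2 * (j : Int) + (m : Int) + 2, (j : Int) + 1) (vd 1) (m + 2)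
                  ++ (legPts (2 * (j : Int) + (m : Int) + 1, (j : Int) + (m : Int) + 1) (vd 2) (m + 1)
                    ++ (P m).map (sh (j + 1)))) = P N := by
              rw [← hP1]
            refine mem_pre_of hPg2 hBP ?_
            intro hc
            rcases List.mem_append.mp hc with hc | hc
            · rw [mem_legPts'] at hc; obtain ⟨i, hi, heq⟩ := hc
              rw [Prod.mk.injEq] at heq; obtain ⟨e1, e2⟩ := heq
              simp [vd] at e1 e2 <;> omega
            rcases List.mem_append.mp hc with hc | hc
            · rw [mem_legPts'] at hc; obtain ⟨i, hi, heq⟩ := hc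
              rw [Prod.mk.injEq] at heq; obtain ⟨e1, e2⟩ := heq
              simp [vd] at e1 e2 <;> omega
            · obtain ⟨g1, g2, g3, g4⟩ := hinb _ hc; simp at g1 g2 g3 g4 <;> omega
        · rw [legPts_cons, List.cons_append]
          simp
          constructor <;> ring
      have h2 := legRun N (m + 2) (2 * (j : Int) + (m : Int) + 2, (j : Int) + 1)
        (2 * (j : Int) + (m : Int) + 2, (j : Int) + (m : Int) + 2) 1
        (pre ++ legPts (2 * (j : Int), (j : Int)) (vd 0) (m + 3)) _
        (by right; left; rfl) hP2 (by omega) hq2 hturn2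
      rw [if_neg (by
        intro hc
        exact ne_nil_legPts (show 1 ≤ m + 1 by omega) (List.append_eq_nil_iff.mp hc).1)] at h2
      -- leg 3 (diagonal)
      have hP3 : ((pre ++ legPts (2 * (j : Int), (j : Int)) (vd 0) (m + 3))
          ++ legPts (2 * (j : Int) + (m : Int) + 2, (j : Int) + 1) (vd 1) (m + 2))
          ++ legPts (2 * (j : Int) + (m : Int) + 1, (j : Int) + (m : Int) + 1) (vd 2) (m + 1)
          ++ (P m).map (sh (j + 1)) = P N := by
        rw [← hP1]; simp [List.append_assoc]
      have hq3 : ((2 * (j : Int) + 1, (j : Int) + 1) : Int × Int)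
          = ((2 * (j : Int) + (m : Int) + 1, (j : Int) + (m : Int) + 1).1
              + (((m + 1 : Nat) : Int) - 1) * (vd 2).1,
             (2 * (j : Int) + (m : Int) + 1, (j : Int) + (m : Int) + 1).2
              + (((m + 1 : Nat) : Int) - 1) * (vd 2).2) := by
        rw [Prod.mk.injEq]
        constructor <;> simp [vd] <;> push_cast <;> ring
      have hturn3 : ((P m).map (sh (j + 1)) ≠ []) →
          (((N : Int) ≤ 2 * (j : Int) + 1 + -1
            ∨ 2 * (j : Int) + 1 + 1 ≤ (j : Int) + 1 + -1
            ∨ ((2 * (j : Int) + 1 + -1, (j : Int) + 1 + -1) : Int × Int)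
              ∈ (pre ++ legPts (2 * (j : Int), (j : Int)) (vd 0) (m + 3))
                ++ legPts (2 * (j : Int) + (m : Int) + 2, (j : Int) + 1) (vd 1) (m + 2))
           ∧ ((P m).map (sh (j + 1))).head?
             = some (2 * (j : Int) + 1 + 1, (j : Int) + 1 + 0)) := by
        intro hin
        constructor
        · right; right
          refine List.mem_append_left _ (List.mem_append_right _ ?_)
          rw [mem_legPts']
          refine ⟨0, by omega, ?_⟩
          rw [Prod.mk.injEq]
          constructor <;> simp [vd]
        · have hm1 : 1 ≤ m := by
            by_contra hm0
            have : m = 0 := by omega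
            subst this
            exact hin (by rw [show P 0 = [] from rfl]; rfl)
          obtain ⟨t, ht⟩ := P_head m hm1
          rw [ht, List.map_cons]
          simp only [List.head?_cons, Option.some.injEq, sh, Prod.mk.injEq]
          push_cast
          constructor <;> ring
      have h3 := legRun N (m + 1) (2 * (j : Int) + (m : Int) + 1, (j : Int) + (m : Int) + 1)
        (2 * (j : Int) + 1, (j : Int) + 1) 2
        ((pre ++ legPts (2 * (j : Int), (j : Int)) (vd 0) (m + 3))
          ++ legPts (2 * (j : Int) + (m : Int) + 2, (j : Int) + 1) (vd 1) (m + 2))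
        ((P m).map (sh (j + 1)))
        (by right; right; rfl) hP3 (by omega) hq3 hturn3
      -- glue the three legs together
      refine h1.trans ?_
      refine Eq.trans ?_ (h2.trans ?_)
      · refine loopA_congr ?_ ?_ (by decide) ?_
        · rw [show PySem.Int.mod ((0 : Int) + 1) 3 = 1 from by decide]; simp [vd]
        · rw [show PySem.Int.mod ((0 : Int) + 1) 3 = 1 from by decide]; simp [vd]
        · simp only [List.length_append, legPts_length]; push_cast; ring
      refine Eq.trans ?_ h3 |>.trans ?_
      · refine loopA_congr ?_ ?_ (by decide) ?_
        · rw [show PySem.Int.mod ((1 : Int) + 1) 3 = 2 from by decide]; simp [vd]; try ring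
        · rw [show PySem.Int.mod ((1 : Int) + 1) 3 = 2 from by decide]; simp [vd]; try ring
        · simp only [List.length_append, legPts_length]; push_cast; ring
      by_cases hin : (P m).map (sh (j + 1)) = []
      · rw [if_pos hin]
      · rw [if_neg hin]
        have hP4 : (((pre ++ legPts (2 * (j : Int), (j : Int)) (vd 0) (m + 3))
            ++ legPts (2 * (j : Int) + (m : Int) + 2, (j : Int) + 1) (vd 1) (m + 2))
            ++ legPts (2 * (j : Int) + (m : Int) + 1, (j : Int) + (m : Int) + 1) (vd 2) (m + 1))
            ++ (P m).map (sh (j + 1)) = P N := by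
          rw [← hP1]; simp [List.append_assoc]
        have hIH := ih m (by omega) (j + 1)
          (((pre ++ legPts (2 * (j : Int), (j : Int)) (vd 0) (m + 3))
            ++ legPts (2 * (j : Int) + (m : Int) + 2, (j : Int) + 1) (vd 1) (m + 2))
            ++ legPts (2 * (j : Int) + (m : Int) + 1, (j : Int) + (m : Int) + 1) (vd 2) (m + 1))
          (by omega) hP4
        refine Eq.trans ?_ hIH
        refine loopA_congr ?_ ?_ (by decide) ?_
        · rw [show PySem.Int.mod ((2 : Int) + 1) 3 = 0 from by decide]; simp [vd] <;> (push_cast; try ring)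
        · rw [show PySem.Int.mod ((2 : Int) + 1) 3 = 0 from by decide]; simp [vd] <;> (push_cast; try ring)
        · simp only [List.length_append, legPts_length]; push_cast; ring


lemma sh_zero_map (l : List (Int × Int)) : l.map (sh 0) = l := by
  have h : ∀ p : Int × Int, sh 0 p = p := by
    intro p; simp [sh]
  rw [List.map_congr_left (fun p _ => h p)]
  exact List.map_id' l

lemma init_arr (n : Int) :
    (PySem.List.pyRange 1 (n + 1) 1).map (fun i => List.replicate i.toNat (0 : Int))
      = arr0 n.toNat := by
  rw [PySem.List.pyRange_one, arr0, List.map_map]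
  have he : (n + 1 - 1).toNat = n.toNat := by omega
  rw [he]
  apply List.map_congr_left
  intro k hk
  simp only [Function.comp_apply]
  congr 1
  omega

lemma countdown (n : Int) :
    PySem.List.pyRange n 0 (-1) = (legs n.toNat).map (fun (L : Nat) => (L : Int)) := by
  rw [PySem.List.pyRange_neg_one, legs, List.map_map]
  have he : (n - 0).toNat = n.toNat := by omega
  rw [he]
  apply List.map_congr_left
  intro k hk
  simp only [List.mem_range] at hk
  simp only [Function.comp_apply]
  omega

lemma end_eq (n : Int) : calculate_end_number n = ((P n.toNat).length : Int) := by
  rw [calculate_end_number, countdown]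
  have h := PySem.List.foldl_add (fun i : Int => i)
    (l := (legs n.toNat).map (fun (L : Nat) => (L : Int))) (a := 0)
  simp only at h
  rw [h, P, walk_length]
  push_cast
  simp [Function.comp_def]

lemma A_eq (n : Int) : solution n = (writeSeq (arr0 n.toNat) (P n.toNat) 1).flatten := by
  unfold solution
  simp only [init_arr, end_eq]
  have hc := cycleRun n.toNat n.toNat 0 [] (by omega)
    (by rw [List.nil_append, sh_zero_map])
  simp only [writeSeq, List.length_nil, Nat.cast_zero, Nat.cast_ofNat, mul_zero, zero_add] at hc
  unfold dirsL at hc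
  rw [PySem.List.foldl_append_eq_flatten, List.nil_append, hc]

lemma innerB' (dy dx : Int) : ∀ (l : List Int) (arr : List (List Int)) (y x num : Int),
    l.foldl (fun (t : List (List Int) × Int × Int × Int) _ =>
        (PySem.List.pySetD t.1 t.2.1 (PySem.List.pySetD (PySem.List.pyGetD t.1 t.2.1 []) t.2.2.1 t.2.2.2),
         t.2.1 + dy, t.2.2.1 + dx, t.2.2.2 + 1)) (arr, y, x, num)
      = (writeSeq arr (legPts (y, x) (dy, dx) l.length) num,
         y + l.length * dy, x + l.length * dx, num + l.length) := by
  intro l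
  induction l with
  | nil => intro arr y x num; simp [legPts, writeSeq]
  | cons a l ih =>
    intro arr y x num
    rw [List.foldl_cons]
    simp only []
    rw [ih, List.length_cons, legPts_cons]
    refine congrArg₂ _ ?_ (by push_cast [Prod.ext_iff]; refine ⟨by ring, by ring, by ring⟩)
    rw [writeSeq, writeC]

lemma outerB : ∀ (ls : List Nat) (p : Int × Int) (d : Int) (arr : List (List Int)) (num : Int),
    (d = 0 ∨ d = 1 ∨ d = 2) →
    ((ls.map (fun (L : Nat) => (L : Int))).foldl
      (fun (s : List (List Int) × Int × Int × Int × Int) leg =>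
        let (arr, y, x, d, num) := s
        let (dy, dx) := PySem.List.pyGetD dirsL d (0, 0)
        let t := (PySem.List.pyRange 0 leg 1).foldl
          (fun (t : List (List Int) × Int × Int × Int) _ =>
            let (arr, y, x, num) := t
            (PySem.List.pySetD arr y (PySem.List.pySetD (PySem.List.pyGetD arr y []) x num),
             y + dy, x + dx, num + 1)) (arr, y, x, num)
        let d' := PySem.Int.mod (d + 1) 3
        let w := PySem.List.pyGetD dirsL d' (0, 0)
        (t.1, t.2.1 + w.1 - dy, t.2.2.1 + w.2 - dx, d', t.2.2.2)) (arr, p.1, p.2, d, num)).1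
      = writeSeq arr (walk ls p d) num := by
  intro ls
  induction ls with
  | nil => intro p d arr num hd; rfl
  | cons L ls ih =>
    intro p d arr num hd
    rw [List.map_cons, List.foldl_cons]
    simp only [pyGetD_dirsL hd, pyGetD_dirsL (mod3_mem hd)]
    rw [innerB' ((vd d).1) ((vd d).2)]
    have hlen : (PySem.List.pyRange 0 (L : Int) 1).length = L := by
      rw [PySem.List.length_pyRange_one]; omega
    have ih' := ih (p.1 + (L : Int) * (vd d).1 + (vd (PySem.Int.mod (d + 1) 3)).1 - (vd d).1,
        p.2 + (L : Int) * (vd d).2 + (vd (PySem.Int.mod (d + 1) 3)).2 - (vd d).2)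
      (PySem.Int.mod (d + 1) 3) (writeSeq arr (legPts p (vd d) L) num) (num + (L : Int))
      (mod3_mem hd)
    simp only [hlen] at ih' ⊢
    simp only [Prod.mk.eta] at ih' ⊢
    rw [show walk (L :: ls) p d = legPts p (vd d) L ++ walk ls
        (nextStart p (vd d) (vd (PySem.Int.mod (d + 1) 3)) L) (PySem.Int.mod (d + 1) 3) from rfl,
      writeSeq_append, legPts_length,
      show nextStart p (vd d) (vd (PySem.Int.mod (d + 1) 3)) L
        = (p.1 + (L : Int) * (vd d).1 + (vd (PySem.Int.mod (d + 1) 3)).1 - (vd d).1,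
           p.2 + (L : Int) * (vd d).2 + (vd (PySem.Int.mod (d + 1) 3)).2 - (vd d).2) by
        simp only [nextStart, Prod.mk.injEq]; constructor <;> ring]
    exact ih'

lemma B_eq (n : Int) : solution_alt n = (writeSeq (arr0 n.toNat) (P n.toNat) 1).flatten := by
  unfold solution_alt
  simp only [init_arr, countdown]
  have ho := outerB (legs n.toNat) (0, 0) 0 (arr0 n.toNat) 1 (by left; rfl)
  unfold dirsL at ho
  rw [show walk (legs n.toNat) (0, 0) 0 = P n.toNat from rfl] at ho
  simp only [] at ho
  rw [ho, List.flatMap_id']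

-- ===== VERDICT (by name: the statement is the Claim_ definition above) =====
theorem solution_spec : Claim_equal_solution := by
  intro n _
  unfold Spec_solution
  rw [A_eq, B_eq]
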